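-- pv_equiv track=rewrite | github.com/GBERESEARCH/tradingsystems | tradingsystems/winloss.py | _calc_trade_runs
-- ===== SOURCE A (Python) =====
-- def _calc_trade_runs(input_trades_list: list) -> list[tuple[int, int]]:
--
--     # Set initial values
--     max_run_count = 1
--     run_count = 1
--     run_trades_list = []
--     total_run_trades_list = []
--     last_trade_count = 0
--
--     # For each trade in the winning or losing trades list, sorting by the
--     # trade number
--     for num, trade in enumerate(sorted(input_trades_list)):
--         # For the first trade
--         if num == 0:
--
--             # Add the trade pnl to the winning / losing trades run list
--             run_trades_list.append(trade[1])
--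
--             # If this is the last trade
--             if num == len(input_trades_list) - 1:
--                 total_run_trades_list.append(run_trades_list)
--
--         # Otherwise, if the trade number is next in sequence after the
--         # last stored trade number
--         elif trade[0] == last_trade_count + 1:
--
--             # Increase the run count by one
--             run_count +=1
--
--             # Update the longest run count
--             max_run_count = max(max_run_count, run_count)
--
--             # Add the trade pnl to the winning / losing trades run list
--             run_trades_list.append(trade[1])
--
--             # If this is the last trade
--             if num == len(input_trades_list) - 1:
--                 total_run_trades_list.append(run_trades_list)
--
--         # If the trade is not the next in sequence:
--         else:
--
--             # Add the current run to the list of all runs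
--             total_run_trades_list.append(run_trades_list)
--
--             # If this is not the last trade
--             if num != len(input_trades_list) - 1:
--
--                 # Reset the winning / losing trades run list
--                 run_trades_list = []
--
--                 # Add the trade pnl to the winning / losing trades run list
--                 run_trades_list.append(trade[1])
--
--                 # Increase the run count by one
--                 run_count = 1
--
--             # If it is the last trade
--             else:
--
--                 # Reset the winning / losing trades run list
--                 run_trades_list = []
--
--                 # Add the trade pnl to the winning / losing trades run list
--                 run_trades_list.append(trade[1])
--
--                 # Add the current run to the list of all runs
--                 total_run_trades_list.append(run_trades_list)
--
--         # Set the last trade count number to the current trade number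
--         last_trade_count = trade[0]
--
--     # Tuple for each run of PNL and number of trades.
--     pnl = sorted([(sum(x), len(x)) for x in total_run_trades_list])
--
--     return pnl
-- ===== SOURCE B (Python) =====
-- def _calc_trade_runs(input_trades_list: list) -> list[tuple[int, int]]:
--     # Staged-passes formulation: find every run boundary up front by comparing
--     # zip-adjacent trade numbers, then slice the sorted list between
--     # consecutive boundaries; no running state machine, no first/last cases.
--     if not input_trades_list:
--         return []
--     s = sorted(input_trades_list)
--     n = len(s)
--     cuts = [0] + [i for i, (prev, cur) in enumerate(zip(s, s[1:]), 1)
--                   if cur[0] != prev[0] + 1] + [n]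
--     return sorted((sum(p for _, p in s[a:b]), b - a)
--                   for a, b in zip(cuts, cuts[1:]))
-- ===== Notes on version B (the rewrite author's own statement) =====
-- stated objective: simpler
-- what changed: Replaced A's enumerate-driven state machine (per-run pnl lists, run/max-run counters, special cases for the first and last trade) with a staged pipeline: compute all run-boundary indices at once by comparing zip-adjacent trade numbers, then slice the sorted list between consecutive boundaries and summarize each slice.
import Mathlib
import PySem

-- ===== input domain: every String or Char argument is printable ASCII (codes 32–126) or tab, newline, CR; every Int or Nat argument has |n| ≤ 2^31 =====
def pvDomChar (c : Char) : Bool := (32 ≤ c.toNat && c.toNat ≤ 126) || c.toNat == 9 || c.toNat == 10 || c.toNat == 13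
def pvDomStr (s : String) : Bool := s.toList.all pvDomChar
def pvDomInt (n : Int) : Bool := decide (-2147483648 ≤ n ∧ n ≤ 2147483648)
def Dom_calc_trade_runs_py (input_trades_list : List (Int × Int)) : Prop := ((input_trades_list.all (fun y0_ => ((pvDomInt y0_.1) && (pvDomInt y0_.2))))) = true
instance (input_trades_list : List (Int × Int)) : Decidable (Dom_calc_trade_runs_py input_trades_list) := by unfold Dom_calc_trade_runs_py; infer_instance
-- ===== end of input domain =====

-- B replaces A's enumerate-driven state machine (per-run pnl lists, run counters,
-- first/last-trade special cases) by staged passes: all run-boundary indices are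
-- computed at once, then the sorted list is sliced between consecutive boundaries
-- (objective: simpler).

-- ===== PORT A =====
-- A's loop body, one step per element of enumerate(sorted(input)); state is
-- (max_run_count, run_count, run_trades_list, total_run_trades_list, last_trade_count).
def stepA (n : Int) (st : Int × Int × List Int × List (List Int) × Int)
    (nt : Int × (Int × Int)) : Int × Int × List Int × List (List Int) × Int :=
  let num := nt.1
  let trade := nt.2
  let maxrc := st.1
  let rc := st.2.1
  let run := st.2.2.1
  let total := st.2.2.2.1
  let last := st.2.2.2.2
  if num = 0 then
    let run := run ++ [trade.2]
    let total := if num = n - 1 then total ++ [run] else total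
    (maxrc, rc, run, total, trade.1)
  else if trade.1 = last + 1 then
    let rc := rc + 1
    let maxrc := max maxrc rc
    let run := run ++ [trade.2]
    let total := if num = n - 1 then total ++ [run] else total
    (maxrc, rc, run, total, trade.1)
  else
    let total := total ++ [run]
    if num ≠ n - 1 then
      (maxrc, 1, [trade.2], total, trade.1)
    else
      let run := [trade.2]
      (maxrc, rc, run, total ++ [run], trade.1)

def calc_trade_runs_py (input_trades_list : List (Int × Int)) : List (Int × Int) :=
  let n := PySem.List.len input_trades_list
  let st := (PySem.List.enumerate (PySem.List.sorted2 input_trades_list Prod.fst Prod.snd)).foldl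
      (stepA n) (1, 1, [], [], 0)
  PySem.List.sorted2 (st.2.2.2.1.map (fun x => (x.sum, (x.length : Int)))) Prod.fst Prod.snd

-- ===== PORT B =====
def calc_trade_runs_py_alt (input_trades_list : List (Int × Int)) : List (Int × Int) :=
  if input_trades_list = [] then []
  else
    let s := PySem.List.sorted2 input_trades_list Prod.fst Prod.snd
    let n := PySem.List.len s
    let cuts := [(0 : Int)] ++
      ((PySem.List.enumerate (s.zip (PySem.List.slice s (some 1) none)) 1).filter
        (fun p => p.2.2.1 != p.2.1.1 + 1)).map (fun p => p.1) ++ [n]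
    PySem.List.sorted2
      ((cuts.zip (PySem.List.slice cuts (some 1) none)).map
        (fun ab => (((PySem.List.slice s (some ab.1) (some ab.2)).map Prod.snd).sum, ab.2 - ab.1)))
      Prod.fst Prod.snd

-- ===== PRECONDITION & SPEC =====
def Spec_calc_trade_runs_py (input_trades_list : List (Int × Int)) (out : List (Int × Int)) : Prop := out = calc_trade_runs_py_alt input_trades_list
instance (input_trades_list : List (Int × Int)) (out : List (Int × Int)) : Decidable (Spec_calc_trade_runs_py input_trades_list out) := by unfold Spec_calc_trade_runs_py; infer_instance

-- ===== CLAIM =====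
def Claim_equal_calc_trade_runs_py : Prop := ∀ (input_trades_list : List (Int × Int)), Dom_calc_trade_runs_py input_trades_list → Spec_calc_trade_runs_py input_trades_list (calc_trade_runs_py input_trades_list)

-- ===== LEMMAS AND PROOFS =====

-- Reference: the runs (as pnl lists) of the tail, given the open run `cur` and last trade number `last`.
def runsGo (cur : List Int) (last : Int) : List (Int × Int) → List (List Int)
  | [] => [cur]
  | tp :: rest =>
      if tp.1 = last + 1 then runsGo (cur ++ [tp.2]) tp.1 rest
      else cur :: runsGo [tp.2] tp.1 rest

-- Same, keeping the full pairs.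
def grp (cur : List (Int × Int)) (last : Int) : List (Int × Int) → List (List (Int × Int))
  | [] => [cur]
  | tp :: rest =>
      if tp.1 = last + 1 then grp (cur ++ [tp]) tp.1 rest
      else cur :: grp [tp] tp.1 rest

-- Interior run boundaries of `last`-prefixed tail, indexed from i.
def innerCuts (last : Int) (i : Int) : List (Int × Int) → List Int
  | [] => []
  | q :: t => (if q.1 = last + 1 then ([] : List Int) else [i]) ++ innerCuts q.1 (i + 1) t

-- End boundaries of a list of parts starting at position a.
def goB (a : Int) : List (List (Int × Int)) → List Int
  | [] => []
  | r :: rs => (a + r.length) :: goB (a + r.length) rs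

lemma foldA_go (n : Int) (xs : List (Int × Int)) :
    ∀ (i m rc : Int) (run : List Int) (total : List (List Int)) (last : Int),
    xs ≠ [] → 1 ≤ i → i + xs.length = n →
    ((PySem.List.enumerate xs i).foldl (stepA n) (m, rc, run, total, last)).2.2.2.1
      = total ++ runsGo run last xs := by
  induction xs with
  | nil => intro _ _ _ _ _ _ hne _ _; exact absurd rfl hne
  | cons tp rest ih =>
    intro i m rc run total last _ hi hn
    rw [PySem.List.enumerate_cons, List.foldl_cons]
    have hnum0 : ¬ (i = 0) := by omega
    by_cases hcond : tp.1 = last + 1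
    · cases rest with
      | nil =>
        have hlastpos : i = n - 1 := by simp at hn; omega
        have hn10 : ¬ (n - 1 = 0) := by omega
        simp [stepA, hcond, hlastpos, hn10, PySem.List.enumerate, runsGo]
      | cons y ys =>
        have hnl : ¬ (i = n - 1) := by simp at hn ⊢; omega
        have hstep : stepA n (m, rc, run, total, last) (i, tp)
            = (max m (rc + 1), rc + 1, run ++ [tp.2], total, tp.1) := by
          simp [stepA, hnum0, hcond, hnl]
        rw [hstep, ih (i + 1) _ _ _ _ _ (by simp) (by omega) (by simp at hn ⊢; omega)]
        simp [runsGo, hcond]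
    · cases rest with
      | nil =>
        have hlastpos : i = n - 1 := by simp at hn; omega
        have hn10 : ¬ (n - 1 = 0) := by omega
        simp [stepA, hcond, hlastpos, hn10, PySem.List.enumerate, runsGo]
      | cons y ys =>
        have hnl : ¬ (i = n - 1) := by simp at hn ⊢; omega
        have hstep : stepA n (m, rc, run, total, last) (i, tp)
            = (m, 1, [tp.2], total ++ [run], tp.1) := by
          simp [stepA, hnum0, hcond, hnl]
        rw [hstep, ih (i + 1) _ _ _ _ _ (by simp) (by omega) (by simp at hn ⊢; omega)]
        simp [runsGo, hcond]

-- grp projects to runsGo under Prod.snd.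
lemma grp_snd (xs : List (Int × Int)) : ∀ (cur : List (Int × Int)) (last : Int),
    (grp cur last xs).map (List.map Prod.snd) = runsGo (cur.map Prod.snd) last xs := by
  induction xs with
  | nil => intro cur last; simp [grp, runsGo]
  | cons tp rest ih =>
    intro cur last
    by_cases hcond : tp.1 = last + 1
    · simp only [grp, runsGo, hcond, if_pos]
      rw [ih]; simp
    · simp only [grp, runsGo, hcond, ite_false, List.map_cons]
      rw [ih]; simp

-- grp is a partition of cur ++ xs.
lemma grp_flatten (xs : List (Int × Int)) : ∀ (cur : List (Int × Int)) (last : Int),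
    (grp cur last xs).flatten = cur ++ xs := by
  induction xs with
  | nil => intro cur last; simp [grp]
  | cons tp rest ih =>
    intro cur last
    by_cases hcond : tp.1 = last + 1
    · simp only [grp, hcond, if_pos]; rw [ih]; simp
    · simp only [grp, hcond, ite_false, List.flatten_cons]; rw [ih]; simp

-- The filtered enumerate over zip-adjacent pairs IS innerCuts.
lemma filter_zip_innerCuts (t : List (Int × Int)) : ∀ (prev : Int × Int) (i : Int),
    (((PySem.List.enumerate ((prev :: t).zip t) i).filter
        (fun p => p.2.2.1 != p.2.1.1 + 1)).map (fun p => p.1))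
      = innerCuts prev.1 i t := by
  induction t with
  | nil => intro prev i; simp [innerCuts]
  | cons q t ih =>
    intro prev i
    rw [List.zip_cons_cons, PySem.List.enumerate_cons, List.filter_cons]
    by_cases hcond : q.1 = prev.1 + 1
    · have hb : (q.1 != prev.1 + 1) = false := by simpa using hcond
      rw [hb]
      simp only [Bool.false_eq_true, if_false, innerCuts]
      rw [if_pos hcond, List.nil_append]
      exact ih q (i + 1)
    · have hb : (q.1 != prev.1 + 1) = true := by simpa using hcond
      rw [hb]
      simp only [if_true, List.map_cons, innerCuts]
      rw [if_neg hcond, ih q (i + 1)]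
      rfl

-- The end boundaries of grp's runs are exactly the interior cuts plus the final length.
lemma goB_grp (xs : List (Int × Int)) : ∀ (cur : List (Int × Int)) (last a : Int),
    goB a (grp cur last xs)
      = innerCuts last (a + cur.length) xs ++ [a + cur.length + xs.length] := by
  induction xs with
  | nil => intro cur last a; simp [grp, goB, innerCuts]
  | cons q t ih =>
    intro cur last a
    by_cases hcond : q.1 = last + 1
    · rw [show grp cur last (q :: t) = grp (cur ++ [q]) q.1 t by simp [grp, hcond],
        show innerCuts last (a + cur.length) (q :: t)
            = innerCuts q.1 (a + cur.length + 1) t by simp [innerCuts, hcond],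
        ih (cur ++ [q]) q.1 a,
        show a + (((cur ++ [q]).length : Nat) : Int) = a + cur.length + 1 by
          push_cast [List.length_append, List.length_cons, List.length_nil]; ring,
        show a + (cur.length : Int) + 1 + t.length = a + cur.length + ((q :: t).length : Nat) by
          push_cast [List.length_cons, List.length_nil]; ring]
    · rw [show grp cur last (q :: t) = cur :: grp [q] q.1 t by simp [grp, hcond],
        show innerCuts last (a + cur.length) (q :: t)
            = (a + cur.length) :: innerCuts q.1 (a + cur.length + 1) t by simp [innerCuts, hcond]]
      simp only [goB, List.cons_append]
      rw [ih [q] q.1 (a + cur.length),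
        show a + (cur.length : Int) + ((([q] : List (Int × Int)).length : Nat) : Int)
            = a + cur.length + 1 by push_cast [List.length_cons, List.length_nil]; ring,
        show a + (cur.length : Int) + 1 + t.length = a + cur.length + ((q :: t).length : Nat) by
          push_cast [List.length_cons, List.length_nil]; ring]

-- Slicing a list between consecutive cumulative boundaries recovers the parts.
lemma slice_cum (ps : List (List (Int × Int))) :
    ∀ (a : Nat) (s : List (Int × Int)), s.drop a = ps.flatten →
    ((((a : Int) :: goB (a : Int) ps).zip (goB (a : Int) ps)).map
        (fun ab => (((PySem.List.slice s (some ab.1) (some ab.2)).map Prod.snd).sum, ab.2 - ab.1)))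
      = ps.map (fun r => ((r.map Prod.snd).sum, (r.length : Int))) := by
  induction ps with
  | nil => intro a s _; simp [goB]
  | cons r rs ih =>
    intro a s hdrop
    have hflat : s.drop a = r ++ rs.flatten := by simpa using hdrop
    have hcast : (a : Int) + (r.length : Int) = ((a + r.length : Nat) : Int) := by push_cast; ring
    have hdrop' : s.drop (a + r.length) = rs.flatten := by
      have h2 : s.drop (a + r.length) = (s.drop a).drop r.length := by
        rw [List.drop_drop, Nat.add_comm]
      rw [h2, hflat, List.drop_left]
    have hslice : PySem.List.slice s (some (a : Int)) (some ((a : Int) + (r.length : Int)))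
        = r := by
      rw [PySem.List.slice_natCast_add, hflat]
      simp
    simp only [goB, List.zip_cons_cons, List.map_cons]
    rw [hslice]
    refine congrArg₂ List.cons ?_ ?_
    · congr 1; ring
    · rw [hcast]; exact ih (a + r.length) s hdrop'

-- ===== VERDICT (by name: the statement is the Claim_ definition above) =====
theorem calc_trade_runs_py_spec : Claim_equal_calc_trade_runs_py := by
  intro l _
  unfold Spec_calc_trade_runs_py
  by_cases hnil : l = []
  · subst hnil; decide
  · have hperm := PySem.List.sorted2_perm l Prod.fst Prod.snd false
    have hsne : PySem.List.sorted2 l Prod.fst Prod.snd ≠ [] := by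
      intro h
      apply hnil
      have hl := hperm.length_eq
      rw [h] at hl
      exact List.length_eq_zero_iff.mp hl.symm
    obtain ⟨x, xs, hs⟩ := List.exists_cons_of_ne_nil hsne
    have hlen : PySem.List.len l = (1 : Int) + xs.length := by
      rw [PySem.List.len_eq, ← hperm.length_eq, hs]; push_cast [List.length_cons]; ring
    have hlens : PySem.List.len (PySem.List.sorted2 l Prod.fst Prod.snd)
        = (1 : Int) + xs.length := by
      rw [PySem.List.len_eq, hs]; push_cast [List.length_cons]; ring
    have hflat : (grp [x] x.1 xs).flatten = x :: xs := by
      rw [grp_flatten]; rfl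
    -- B's value is the summary of the grouped runs
    have hcuts : ((PySem.List.enumerate
          ((PySem.List.sorted2 l Prod.fst Prod.snd).zip
            (PySem.List.slice (PySem.List.sorted2 l Prod.fst Prod.snd) (some 1) none)) 1).filter
          (fun p => p.2.2.1 != p.2.1.1 + 1)).map (fun p => p.1)
        = innerCuts x.1 1 xs := by
      rw [PySem.List.slice_from_one, hs, List.tail_cons, filter_zip_innerCuts]
    have hgo : goB 0 (grp [x] x.1 xs) = innerCuts x.1 1 xs ++ [1 + (xs.length : Int)] := by
      have h := goB_grp xs [x] x.1 0
      simpa using h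
    have hB : calc_trade_runs_py_alt l = PySem.List.sorted2
        ((grp [x] x.1 xs).map (fun r => ((r.map Prod.snd).sum, (r.length : Int))))
        Prod.fst Prod.snd := by
      rw [calc_trade_runs_py_alt, if_neg hnil]
      simp only [hcuts, hlens]
      have hc : [(0 : Int)] ++ innerCuts x.1 1 xs ++ [1 + (xs.length : Int)]
          = (0 : Int) :: goB 0 (grp [x] x.1 xs) := by
        rw [hgo]; rfl
      rw [hc, PySem.List.slice_from_one, List.tail_cons]
      have hsc := slice_cum (grp [x] x.1 xs) 0 (PySem.List.sorted2 l Prod.fst Prod.snd)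
        (by rw [List.drop_zero, hs, hflat])
      simp only [Nat.cast_zero] at hsc
      rw [hsc]
    rw [hB]
    -- A's value is the summary of the same grouped runs
    rcases eq_or_ne xs [] with hxs | hxs
    · subst hxs
      have hll : ((l.length : Int)) = 1 := by
        have h1 := hlen; rw [PySem.List.len_eq] at h1; simpa using h1
      simp [calc_trade_runs_py, hs, PySem.List.enumerate, stepA, grp, hll]
    · have hxpos : 1 ≤ xs.length := List.length_pos_iff.mpr hxs
      have hone : ¬((0 : Int) = (l.length : Int) - 1) := by
        have h1 := hlen; rw [PySem.List.len_eq] at h1; omega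
      have hstep : stepA (PySem.List.len l) (1, 1, [], [], 0) ((0 : Int), x)
          = (1, 1, [x.2], [], x.1) := by
        simp [stepA, hone]
      have hA : calc_trade_runs_py l
          = PySem.List.sorted2 ((runsGo [x.2] x.1 xs).map
              (fun r => (r.sum, (r.length : Int)))) Prod.fst Prod.snd := by
        simp only [calc_trade_runs_py, hs]
        rw [PySem.List.enumerate_cons, List.foldl_cons, hstep]
        simp only [zero_add]
        rw [foldA_go (PySem.List.len l) xs 1 1 1 [x.2] [] x.1 hxs le_rfl (by rw [hlen])]
        simp
      rw [hA]
      have hsnd := grp_snd xs [x] x.1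
      simp only [List.map_cons, List.map_nil] at hsnd
      rw [← hsnd, List.map_map]
      simp [Function.comp_def]
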